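-- pv_equiv track=rewrite | github.com/homile/PythonStudy | 2021/12.24_27주차/[level2][3차]n진수 게임.py | solution
-- ===== SOURCE A (Python) =====
-- def solution(n, t, m, p):
--     answer = ''
--     # 게임 최대 길이
--     game_length = t * m
--
--     for i in range(game_length):
--         if i == 0:
--             answer += '0'
--         else:
--             answer += str(base(i, n))
--
--     return answer
--
-- def base(n, b):
--     # 16진법으로 풀기위한 A~F까지의 값 지정
--     dict_16 = {10:'A', 11:'B', 12:'C', 13:'D', 14:'E', 15:'F'}
--     temp = ''
--     while n > 0:
--         n, r = divmod(n, b)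
--         if r >= 10:
--             temp += dict_16[r]
--         else:
--             temp += str(r)
--     return temp[::-1]   # 17이상의 변환 값을 나타내기 위함.
-- ===== SOURCE B (Python) =====
-- DIGITS_16 = {10: 'A', 11: 'B', 12: 'C', 13: 'D', 14: 'E', 15: 'F'}
--
--
-- def base(n, b):
--     # recursion over the quotient: most-significant digit first, no reverse
--     if n <= 0:
--         return ''
--     q, r = divmod(n, b)
--     return base(q, b) + (DIGITS_16[r] if r >= 10 else str(r))
--
--
-- def solution(n, t, m, p):
--     total = t * m
--     if total <= 0:
--         return ''
--     return '0' + ''.join(base(i, n) for i in range(1, total))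
-- ===== Notes on version B (the rewrite author's own statement) =====
-- stated objective: alternative
-- what changed: The digit-collecting while-loop (append least-significant digit, then reverse the string) is replaced by a recursion over the quotient that emits the most-significant digit first, and the answer is assembled with ''.join over range(1, t*m) instead of repeated +=.
-- outside the precondition, e.g. on solution(-2, 1, 2, 0): A returns '01-', B returns '0-1'
import Mathlib
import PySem

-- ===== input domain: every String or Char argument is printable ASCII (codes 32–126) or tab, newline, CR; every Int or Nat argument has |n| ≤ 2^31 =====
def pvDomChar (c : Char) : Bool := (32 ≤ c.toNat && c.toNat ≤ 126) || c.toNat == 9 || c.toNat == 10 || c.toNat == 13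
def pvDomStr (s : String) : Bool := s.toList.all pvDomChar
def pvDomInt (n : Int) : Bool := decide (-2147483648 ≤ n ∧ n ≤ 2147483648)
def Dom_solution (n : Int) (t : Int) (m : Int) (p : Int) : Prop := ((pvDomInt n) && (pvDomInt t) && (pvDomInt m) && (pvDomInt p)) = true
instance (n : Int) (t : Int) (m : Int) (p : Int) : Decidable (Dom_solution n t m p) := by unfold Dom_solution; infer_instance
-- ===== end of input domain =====

-- B rewrites the digit-collecting while-loop (build least-significant-first, then reverse) as a
-- recursion over the quotient that emits the most-significant digit first, and joins the pieces;
-- return-value equivalence only (neither program mutates its arguments).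

-- ===== PORT A =====

-- dict_16 = {10:'A', 11:'B', 12:'C', 13:'D', 14:'E', 15:'F'} (shared data constant of both ports)
def dict16 : PySem.Dict Int String :=
  PySem.Dict.ofList [(10, "A"), (11, "B"), (12, "C"), (13, "D"), (14, "E"), (15, "F")]

-- the 'while n > 0' loop of base(n, b); none = exception (divmod by 0, KeyError) or fuel exhaustion
-- (fuel v.toNat+1 is exhausted exactly where the Python loop diverges, i.e. b = 1 with v > 0).
def baseA_loop : Nat → Int → Int → List Char → Option (List Char)
  | 0, _, _, _ => none
  | fuel + 1, v, b, temp =>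
    if v > 0 then
      match PySem.Int.divmod? v b with
      | none => none
      | some (q, r) =>
        if r ≥ 10 then
          match PySem.Dict.get? dict16 r with
          | none => none                                     -- KeyError
          | some d => baseA_loop fuel q b (temp ++ d.toList) -- temp += dict_16[r]
        else baseA_loop fuel q b (temp ++ (PySem.Int.toStr r).toList)  -- temp += str(r)
    else some temp

-- base(v, b): run the loop, then 'return temp[::-1]' (character reverse)
def baseA (v b : Int) : Option (List Char) :=
  (baseA_loop (v.toNat + 1) v b []).map List.reverse

-- body of A's for-loop: answer += '0' when i == 0, else answer += str(base(i, n))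
def stepA (n : Int) (acc : Option (List Char)) (i : Int) : Option (List Char) :=
  match acc with
  | none => none
  | some a =>
    if i = 0 then some (a ++ ['0'])
    else
      match baseA i n with
      | none => none
      | some s => some (a ++ s)

def solution (n : Int) (t : Int) (m : Int) (p : Int) : String :=
  match (PySem.List.pyRange 0 (t * m) 1).foldl (stepA n) (some ([] : List Char)) with
  | some a => String.ofList a
  | none => ""          -- exception path; excluded by Pre_solution

-- ===== PORT B =====

-- digit(r) of Source B: DIGITS_16[r] if r >= 10 else str(r)
def digitB (r : Int) : Option (List Char) :=
  if r ≥ 10 then (PySem.Dict.get? dict16 r).map String.toList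
  else some (PySem.Int.toStr r).toList

-- base(n, b) of Source B: '' if n <= 0 else base(n // b, b) + digit(n % b)
def baseB : Nat → Int → Int → Option (List Char)
  | 0, _, _ => none
  | fuel + 1, v, b =>
    if v ≤ 0 then some []
    else
      match PySem.Int.divmod? v b with
      | none => none
      | some (q, r) =>
        match baseB fuel q b, digitB r with
        | some s, some d => some (s ++ d)
        | _, _ => none

-- one step of ''.join(base(i, n) for i in range(1, total))
def stepB (n : Int) (acc : Option (List Char)) (i : Int) : Option (List Char) :=
  match acc, baseB (i.toNat + 1) i n with
  | some a, some s => some (a ++ s)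
  | _, _ => none

def solution_alt (n : Int) (t : Int) (m : Int) (p : Int) : String :=
  if t * m ≤ 0 then ""
  else
    match (PySem.List.pyRange 1 (t * m) 1).foldl (stepB n) (some ([] : List Char)) with
    | some a => String.ofList ('0' :: a)
    | none => ""        -- exception path; excluded by Pre_solution

-- ===== PRECONDITION & SPEC =====

-- Pre_ excludes (a) inputs where the Python A does not return: with t*m ≥ 2 the loop reaches
-- base(1, n), which raises ZeroDivisionError for n = 0 and loops forever for n = 1, and for
-- n ≥ 17 with t*m ≥ 17 the digit 16 of i = 16 raises KeyError; and (b) negative bases n ≤ -2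
-- (with t*m ≥ 2), outside the function's evident base-2..16 contract, where Python's negative
-- remainders make str(r) multi-character and both A's character-reversed string and B's
-- digit-order string are pseudo-digit renderings no caller would specify either way.
def Pre_solution (n : Int) (t : Int) (m : Int) (p : Int) : Prop :=
  t * m ≤ 1 ∨ n = -1 ∨ (2 ≤ n ∧ n ≤ 16) ∨ (17 ≤ n ∧ t * m ≤ 16)
instance (n : Int) (t : Int) (m : Int) (p : Int) : Decidable (Pre_solution n t m p) := by
  unfold Pre_solution; infer_instance

def pvWitness_solution : Int × Int × Int × Int := (16, 2, 3, 0)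

def Spec_solution (n : Int) (t : Int) (m : Int) (p : Int) (out : String) : Prop :=
  out = solution_alt n t m p
instance (n : Int) (t : Int) (m : Int) (p : Int) (out : String) : Decidable (Spec_solution n t m p out) := by
  unfold Spec_solution; infer_instance

-- ===== CLAIM (what is proved, stated in full; the proofs are below) =====
def Claim_equal_solution : Prop := ∀ (n : Int) (t : Int) (m : Int) (p : Int), Dom_solution n t m p → Pre_solution n t m p → Spec_solution n t m p (solution n t m p)

-- ===== LEMMAS AND PROOFS =====

lemma digit_single (r : Int) (h0 : 0 ≤ r) (h1 : r ≤ 15) : ∃ c : Char, digitB r = some [c] := by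
  interval_cases r
  · exact ⟨'0', rfl⟩
  · exact ⟨'1', rfl⟩
  · exact ⟨'2', rfl⟩
  · exact ⟨'3', rfl⟩
  · exact ⟨'4', rfl⟩
  · exact ⟨'5', rfl⟩
  · exact ⟨'6', rfl⟩
  · exact ⟨'7', rfl⟩
  · exact ⟨'8', rfl⟩
  · exact ⟨'9', rfl⟩
  · exact ⟨'A', rfl⟩
  · exact ⟨'B', rfl⟩
  · exact ⟨'C', rfl⟩
  · exact ⟨'D', rfl⟩
  · exact ⟨'E', rfl⟩
  · exact ⟨'F', rfl⟩

-- A's loop (digits appended least-significant-first into temp) against B's recursion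
-- (most-significant-first), for the same fuel: whenever every emitted digit is a single
-- character, reversing A's temp is exactly B's string.
lemma loop_eq : ∀ (fuel : Nat) (v b : Int) (acc : List Char),
    (b = -1 ∨ 2 ≤ b) → (17 ≤ b → v ≤ 15) →
    baseA_loop fuel v b acc = (baseB fuel v b).map (fun s => acc ++ s.reverse) := by
  intro fuel
  induction fuel with
  | zero => intro v b acc _ _; rfl
  | succ fuel ih =>
    intro v b acc hb hv
    by_cases hvpos : v > 0
    · have hbne : b ≠ 0 := by rcases hb with h | h <;> omega
      have hdm : PySem.Int.divmod? v b = some (PySem.Int.floordiv v b, PySem.Int.mod v b) := by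
        simp only [PySem.Int.divmod?, if_neg hbne]
        rfl
      set q := PySem.Int.floordiv v b with hq
      set r := PySem.Int.mod v b with hr
      -- bounds for the emitted remainder and the next value
      have hbounds : 0 ≤ r ∧ r ≤ 15 ∧ (17 ≤ b → q ≤ 15) := by
        rcases hb with h | h
        · have := PySem.Int.mod_neg_bounds v (b := b) (by omega)
          refine ⟨by omega, by omega, by omega⟩
        · have h0 := PySem.Int.mod_nonneg v (b := b) (by omega)
          have h1 := PySem.Int.mod_lt v (b := b) (by omega)
          by_cases h17 : 17 ≤ b
          · have hv15 := hv h17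
            have hq0 : q = 0 := by
              rw [hq, PySem.Int.floordiv_eq_iff_of_pos (by omega)]
              constructor <;> omega
            have hmul := PySem.Int.floordiv_mul_add_mod v b
            rw [← hq, ← hr, hq0, zero_mul, zero_add] at hmul
            exact ⟨h0, by omega, fun _ => by omega⟩
          · exact ⟨h0, by omega, fun h' => absurd h' h17⟩
      obtain ⟨hr0, hr15, hq15⟩ := hbounds
      obtain ⟨c, hc⟩ := digit_single r hr0 hr15
      have ihq := ih q b (acc ++ [c]) hb hq15
      -- A's step appends exactly [c]
      have hA : baseA_loop (fuel + 1) v b acc = baseA_loop fuel q b (acc ++ [c]) := by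
        by_cases h10 : r ≥ 10
        · cases hd : PySem.Dict.get? dict16 r with
          | none => rw [digitB, if_pos h10, hd] at hc; simp at hc
          | some d =>
            have hdc : d.toList = [c] := by
              rw [digitB, if_pos h10, hd] at hc; simpa using hc
            simp [baseA_loop, hvpos, hdm, h10, hd, hdc]
        · have hstr : (PySem.Int.toStr r).toList = [c] := by
            simpa [digitB, h10] using hc
          simp [baseA_loop, hvpos, hdm, h10, hstr]
      rw [hA, ihq]
      -- B's step appends [c] on the right; reverse distributes
      cases hB : baseB fuel q b with
      | none => simp [baseB, hdm, hB, hc, show ¬ v ≤ 0 by omega]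
      | some s => simp [baseB, hdm, hB, hc, show ¬ v ≤ 0 by omega]
    · simp [baseA_loop, baseB, hvpos, show v ≤ 0 by omega]

lemma baseA_eq (v b : Int) (hb : b = -1 ∨ 2 ≤ b) (hv : 17 ≤ b → v ≤ 15) :
    baseA v b = baseB (v.toNat + 1) v b := by
  unfold baseA
  rw [loop_eq (v.toNat + 1) v b [] hb hv]
  cases baseB (v.toNat + 1) v b <;> simp

lemma step_eq (n i : Int) (acc : Option (List Char)) (hb : n = -1 ∨ 2 ≤ n)
    (hi : 1 ≤ i) (hv : 17 ≤ n → i ≤ 15) : stepA n acc i = stepB n acc i := by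
  cases acc with
  | none => rfl
  | some a =>
    have h0 : ¬ i = 0 := by omega
    simp only [stepA, stepB]
    rw [if_neg h0, baseA_eq i n hb hv]
    cases baseB (i.toNat + 1) i n <;> rfl

lemma foldB_none (n : Int) (l : List Int) : l.foldl (stepB n) none = none := by
  induction l with
  | nil => rfl
  | cons i l ih => simpa [stepB] using ih

lemma fold_shift (n : Int) (l : List Int) (x : List Char) : ∀ a : List Char,
    l.foldl (stepB n) (some (x ++ a)) = (l.foldl (stepB n) (some a)).map (fun s => x ++ s) := by
  induction l with
  | nil => intro a; rfl
  | cons i l ih =>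
    intro a
    cases hB : baseB (i.toNat + 1) i n with
    | none => simp [List.foldl, stepB, hB, foldB_none]
    | some s =>
      simp only [List.foldl, stepB, hB]
      rw [show x ++ a ++ s = x ++ (a ++ s) by simp, ih (a ++ s)]

-- ===== VERDICT (by name: the statement is the Claim_ definition above) =====
theorem solution_spec : Claim_equal_solution := by
  intro n t m p _ hpre
  by_cases hL0 : t * m ≤ 0
  · rw [Spec_solution, solution, solution_alt,
      PySem.List.pyRange_one_eq_nil (by omega : t * m ≤ 0), if_pos hL0]
    rfl
  · by_cases hL1 : t * m = 1
    · rw [Spec_solution, solution, solution_alt, if_neg hL0, hL1,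
        show PySem.List.pyRange (0:Int) 1 1 = [0] from by decide,
        show PySem.List.pyRange (1:Int) 1 1 = [] from by decide]
      rfl
    · -- t*m ≥ 2: Pre_ leaves n = -1, 2 ≤ n ≤ 16, or 17 ≤ n with t*m ≤ 16
      have hL2 : 2 ≤ t * m := by omega
      have hcases : n = -1 ∨ (2 ≤ n ∧ n ≤ 16) ∨ (17 ≤ n ∧ t * m ≤ 16) := by
        rcases hpre with h | h | h | h <;> [omega; tauto; tauto; tauto]
      have hb : n = -1 ∨ 2 ≤ n := by omega
      rw [Spec_solution, solution, solution_alt, if_neg hL0,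
        PySem.List.pyRange_one_cons (by omega : (0:Int) < t * m),
        show (0:Int) + 1 = 1 from by norm_num]
      simp only [List.foldl_cons]
      have h0 : stepA n (some []) 0 = some ['0'] := by rfl
      rw [h0, PySem.List.foldl_congr_mem _ (stepA n) (stepB n) _ (by
        intro acc i hi
        rw [PySem.List.mem_pyRange_one] at hi
        exact step_eq n i acc hb (by omega) (fun h17 => by omega))]
      rw [show (['0'] : List Char) = ['0'] ++ [] by simp, fold_shift]
      cases List.foldl (stepB n) (some []) (PySem.List.pyRange 1 (t * m)) <;> rfl
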